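-- pv_equiv track=rewrite | github.com/hoshino-love0102/baekjoon | 백준/Platinum/1028. 다이아몬드 광산/다이아몬드 광산.py | largest_diamond
-- ===== SOURCE A (Python) =====
-- def largest_diamond(R, C, mine):
--     ld = [[0] * C for _ in range(R)]
--     rd = [[0] * C for _ in range(R)]
--     lu = [[0] * C for _ in range(R)]
--     ru = [[0] * C for _ in range(R)]
--
--     for i in range(R - 1, -1, -1):
--         for j in range(C):
--             if mine[i][j] == '1':
--                 rd[i][j] = 1
--                 if i < R-1 and j < C-1:
--                     rd[i][j] += rd[i + 1][j+1]
--                 ld[i][j] = 1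
--                 if i < R-1 and j > 0:
--                     ld[i][j] += ld[i+1][j-1]
--
--     for i in range(R):
--         for j in range(C):
--             if mine[i][j] == '1':
--                 lu[i][j] = 1
--                 if i > 0 and j > 0:
--                     lu[i][j] += lu[i-1][j-1]
--                 ru[i][j] = 1
--                 if i > 0 and j < C-1:
--                     ru[i][j] += ru[i-1][j+1]
--
--     max_size = 0
--     for i in range(R):
--         for j in range(C):
--             if mine[i][j] == '0':
--                 continue
--
--             max_possible = min(ld[i][j], rd[i][j])
--
--             for k in range(max_possible, 0, -1):
--                 bottom_i = i + 2*(k-1)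
--                 if bottom_i >= R:
--                     continue
--                 if lu[bottom_i][j] >= k and ru[bottom_i][j] >= k:
--                     max_size = max(max_size, k)
--                     break
--
--     return max_size
-- ===== SOURCE B (Python) =====
-- def largest_diamond(R, C, mine):
--     def ok(i, j):
--         return 0 <= i < R and 0 <= j < C and mine[i][j] == '1'
--
--     best = 0
--     for i in range(R):
--         for j in range(C):
--             kmax = min((R - i + 1) // 2, j + 1, C - j)
--             for k in range(kmax, 0, -1):
--                 b = i + 2 * (k - 1)
--                 if all(ok(i + t, j + t) and ok(i + t, j - t)
--                        and ok(b - t, j + t) and ok(b - t, j - t)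
--                        for t in range(k)):
--                     best = max(best, k)
--                     break
--     return best
-- ===== Notes on version B (the rewrite author's own statement) =====
-- stated objective: simpler
-- what changed: Drops A's four DP run-length tables (ld/rd/lu/ru) and their three grid passes; B checks each candidate top vertex directly, walking the four diagonal edges of the diamond for each size k from the feasible bound downward and keeping a running max.
import Mathlib
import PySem

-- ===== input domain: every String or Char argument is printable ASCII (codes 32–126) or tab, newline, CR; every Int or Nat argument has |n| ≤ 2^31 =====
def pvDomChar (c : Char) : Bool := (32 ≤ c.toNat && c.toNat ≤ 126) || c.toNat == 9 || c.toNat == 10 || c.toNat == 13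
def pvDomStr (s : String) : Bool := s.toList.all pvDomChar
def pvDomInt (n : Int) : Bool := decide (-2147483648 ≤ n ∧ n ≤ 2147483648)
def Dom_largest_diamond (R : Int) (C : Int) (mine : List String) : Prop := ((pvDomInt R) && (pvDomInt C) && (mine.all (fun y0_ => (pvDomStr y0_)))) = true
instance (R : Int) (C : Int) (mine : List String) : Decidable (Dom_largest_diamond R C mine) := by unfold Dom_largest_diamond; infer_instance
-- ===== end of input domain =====

-- B replaces A's four dynamic-programming tables by a direct per-top-vertex check of the
-- four diagonal edges of each candidate diamond; objective: simpler (no speed claim).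

-- mine[i][j] as an optional char (none exactly where Python raises; used by both ports)
def pvAt (mine : List String) (i j : Int) : Option Char :=
  (PySem.List.pyGet? mine i).bind (fun s => PySem.Str.pyGet? s j)

-- ===== PORT A =====
-- functional 2D array: all zero initially, point update (A's list-of-lists tables)
def pvUpd (g : Int → Int → Int) (i j : Int) (v : Int) : Int → Int → Int :=
  fun i' j' => if i' = i ∧ j' = j then v else g i' j'

-- first DP loop body: ld/rd at (i, j)
def pvStep1 (R C : Int) (mine : List String) (i : Int)
    (st : (Int → Int → Int) × (Int → Int → Int)) (j : Int) :
    (Int → Int → Int) × (Int → Int → Int) :=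
  if pvAt mine i j == some '1' then
    let rdv := 1 + (if i < R - 1 ∧ j < C - 1 then st.2 (i+1) (j+1) else 0)
    let ldv := 1 + (if i < R - 1 ∧ 0 < j then st.1 (i+1) (j-1) else 0)
    (pvUpd st.1 i j ldv, pvUpd st.2 i j rdv)
  else st

-- second DP loop body: lu/ru at (i, j)
def pvStep2 (R C : Int) (mine : List String) (i : Int)
    (st : (Int → Int → Int) × (Int → Int → Int)) (j : Int) :
    (Int → Int → Int) × (Int → Int → Int) :=
  if pvAt mine i j == some '1' then
    let luv := 1 + (if 0 < i ∧ 0 < j then st.1 (i-1) (j-1) else 0)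
    let ruv := 1 + (if 0 < i ∧ j < C - 1 then st.2 (i-1) (j+1) else 0)
    (pvUpd st.1 i j luv, pvUpd st.2 i j ruv)
  else st

def pvLoop1 (R C : Int) (mine : List String) : (Int → Int → Int) × (Int → Int → Int) :=
  (PySem.List.pyRange (R-1) (-1) (-1)).foldl
    (fun st i => (PySem.List.pyRange 0 C 1).foldl (pvStep1 R C mine i) st)
    (fun _ _ => 0, fun _ _ => 0)

def pvLoop2 (R C : Int) (mine : List String) : (Int → Int → Int) × (Int → Int → Int) :=
  (PySem.List.pyRange 0 R 1).foldl
    (fun st i => (PySem.List.pyRange 0 C 1).foldl (pvStep2 R C mine i) st)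
    (fun _ _ => 0, fun _ _ => 0)

-- 'for k in range(max_possible, 0, -1): … continue … break' of A
def pvKloopA (R : Int) (lu ru : Int → Int → Int) (i j : Int) : List Int → Int → Int
  | [], ms => ms
  | k :: rest, ms =>
    let bi := i + 2 * (k - 1)
    if R ≤ bi then pvKloopA R lu ru i j rest ms
    else if k ≤ lu bi j ∧ k ≤ ru bi j then max ms k
    else pvKloopA R lu ru i j rest ms

def pvCellA (R C : Int) (mine : List String)
    (ldrd luru : (Int → Int → Int) × (Int → Int → Int)) (i : Int) (ms : Int) (j : Int) : Int :=
  if pvAt mine i j == some '0' then ms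
  else
    let mp := min (ldrd.1 i j) (ldrd.2 i j)
    pvKloopA R luru.1 luru.2 i j (PySem.List.pyRange mp 0 (-1)) ms

def largest_diamond (R : Int) (C : Int) (mine : List String) : Int :=
  let ldrd := pvLoop1 R C mine
  let luru := pvLoop2 R C mine
  (PySem.List.pyRange 0 R 1).foldl
    (fun ms i => (PySem.List.pyRange 0 C 1).foldl (pvCellA R C mine ldrd luru i) ms) 0

-- ===== PORT B =====
def pvOk (R C : Int) (mine : List String) (i j : Int) : Bool :=
  decide (0 ≤ i) && decide (i < R) && decide (0 ≤ j) && decide (j < C)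
    && (pvAt mine i j == some '1')

-- the four diagonal edges of the size-k diamond with top (i,j) and bottom (bi,j)
def pvDiamond (R C : Int) (mine : List String) (i j bi k : Int) : Bool :=
  (PySem.List.pyRange 0 k 1).all (fun t =>
    pvOk R C mine (i+t) (j+t) && pvOk R C mine (i+t) (j-t)
      && pvOk R C mine (bi-t) (j+t) && pvOk R C mine (bi-t) (j-t))

-- 'for k in range(kmax, 0, -1): … break' of B
def pvKloopB (R C : Int) (mine : List String) (i j : Int) : List Int → Int → Int
  | [], best => best
  | k :: rest, best =>
    if pvDiamond R C mine i j (i + 2*(k-1)) k then max best k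
    else pvKloopB R C mine i j rest best

def pvCellB (R C : Int) (mine : List String) (i : Int) (best : Int) (j : Int) : Int :=
  let kmax := min (min (PySem.Int.floordiv (R - i + 1) 2) (j+1)) (C - j)
  pvKloopB R C mine i j (PySem.List.pyRange kmax 0 (-1)) best

def largest_diamond_alt (R : Int) (C : Int) (mine : List String) : Int :=
  (PySem.List.pyRange 0 R 1).foldl
    (fun best i => (PySem.List.pyRange 0 C 1).foldl (pvCellB R C mine i) best) 0

-- ===== PRECONDITION & SPEC =====
-- Pre_ excludes exactly the inputs where Python A raises IndexError: a positive grid size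
-- whose row list is shorter than R or whose first R rows are shorter than C.
def Pre_largest_diamond (R : Int) (C : Int) (mine : List String) : Prop :=
  0 < R → 0 < C → (R ≤ (mine.length : Int) ∧ ∀ s ∈ mine.take R.toNat, C ≤ PySem.Str.len s)
instance (R : Int) (C : Int) (mine : List String) : Decidable (Pre_largest_diamond R C mine) := by
  unfold Pre_largest_diamond; infer_instance

def pvWitness_largest_diamond : Int × Int × List String := (3, 3, ["010", "111", "010"])

def Spec_largest_diamond (R : Int) (C : Int) (mine : List String) (out : Int) : Prop := out = largest_diamond_alt R C mine
instance (R : Int) (C : Int) (mine : List String) (out : Int) : Decidable (Spec_largest_diamond R C mine out) := by unfold Spec_largest_diamond; infer_instance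

-- ===== CLAIM (what is proved, stated in full; the proofs are below) =====
def Claim_equal_largest_diamond : Prop := ∀ (R : Int) (C : Int) (mine : List String), Dom_largest_diamond R C mine → Pre_largest_diamond R C mine → Spec_largest_diamond R C mine (largest_diamond R C mine)

-- ===== LEMMAS AND PROOFS =====

-- the '1'-mask both programs read
def pvG (mine : List String) (i j : Int) : Bool := pvAt mine i j == some '1'

-- length of the run of 1s from (i,j) going DOWN with column step dj, stopping at the border
def downF (R C : Int) (g : Int → Int → Bool) (dj : Int) (i j : Int) : Int :=
  if g i j then
    1 + (if h : i + 1 < R ∧ 0 ≤ j + dj ∧ j + dj < C then downF R C g dj (i+1) (j+dj) else 0)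
  else 0
termination_by (R - i).toNat
decreasing_by omega

-- same going UP
def upF (R C : Int) (g : Int → Int → Bool) (dj : Int) (i j : Int) : Int :=
  if g i j then
    1 + (if h : 0 ≤ i - 1 ∧ 0 ≤ j + dj ∧ j + dj < C then upF R C g dj (i-1) (j+dj) else 0)
  else 0
termination_by i.toNat
decreasing_by omega

lemma downF_nonneg_aux (R C : Int) (g : Int → Int → Bool) (dj : Int) :
    ∀ (n : Nat) (i j : Int), (R - i).toNat ≤ n → 0 ≤ downF R C g dj i j := by
  intro n
  induction n with
  | zero =>
    intro i j hn
    rw [downF]; split_ifs with h1 h2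
    · exfalso; omega
    · omega
    · omega
  | succ n ih =>
    intro i j hn
    rw [downF]; split_ifs with h1 h2
    · have := ih (i+1) (j+dj) (by omega); omega
    · omega
    · omega

lemma downF_nonneg (R C : Int) (g : Int → Int → Bool) (dj i j : Int) : 0 ≤ downF R C g dj i j :=
  downF_nonneg_aux R C g dj (R - i).toNat i j le_rfl

lemma upF_nonneg_aux (R C : Int) (g : Int → Int → Bool) (dj : Int) :
    ∀ (n : Nat) (i j : Int), i.toNat ≤ n → 0 ≤ upF R C g dj i j := by
  intro n
  induction n with
  | zero =>
    intro i j hn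
    rw [upF]; split_ifs with h1 h2
    · exfalso; omega
    · omega
    · omega
  | succ n ih =>
    intro i j hn
    rw [upF]; split_ifs with h1 h2
    · have := ih (i-1) (j+dj) (by omega); omega
    · omega
    · omega

lemma upF_nonneg (R C : Int) (g : Int → Int → Bool) (dj i j : Int) : 0 ≤ upF R C g dj i j :=
  upF_nonneg_aux R C g dj i.toNat i j le_rfl

lemma downF_le_iff (R C : Int) (g : Int → Int → Bool) (dj : Int) (k : Nat) :
    ∀ i j : Int, 0 ≤ i → i < R → 0 ≤ j → j < C →
    (((k : Int) ≤ downF R C g dj i j) ↔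
      ∀ t : Int, 0 ≤ t → t < (k : Int) →
        (i + t < R ∧ 0 ≤ j + t*dj ∧ j + t*dj < C ∧ g (i+t) (j+t*dj) = true)) := by
  induction k with
  | zero =>
    intro i j _ _ _ _
    exact iff_of_true (by exact_mod_cast downF_nonneg R C g dj i j) (by intro t ht ht'; omega)
  | succ k ih =>
    intro i j hi hiR hj hjC
    rw [downF]
    by_cases hg : g i j = true
    · rw [if_pos hg]
      by_cases hcond : i + 1 < R ∧ 0 ≤ j + dj ∧ j + dj < C
      · rw [dif_pos hcond]
        have IH := ih (i+1) (j+dj) (by omega) hcond.1 hcond.2.1 hcond.2.2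
        constructor
        · intro hle t ht ht'
          have hk : (k:ℤ) ≤ downF R C g dj (i+1) (j+dj) := by push_cast at hle; omega
          by_cases ht0 : t = 0
          · subst ht0
            simp only [add_zero, zero_mul]
            exact ⟨hiR, hj, hjC, hg⟩
          · have := (IH.mp hk) (t-1) (by omega) (by push_cast at ht' ⊢; omega)
            have e1 : i + 1 + (t-1) = i + t := by ring
            have e2 : j + dj + (t-1)*dj = j + t*dj := by ring
            rw [e1, e2] at this
            exact this
        · intro hall
          have hk : (k:ℤ) ≤ downF R C g dj (i+1) (j+dj) := by
            refine IH.mpr (fun t ht ht' => ?_)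
            have := hall (t+1) (by omega) (by push_cast; omega)
            have e1 : i + (t+1) = i + 1 + t := by ring
            have e2 : j + (t+1)*dj = j + dj + t*dj := by ring
            rw [e1, e2] at this
            exact this
          push_cast
          omega
      · rw [dif_neg hcond]
        constructor
        · intro hle t ht ht'
          have hk0 : k = 0 := by push_cast at hle; omega
          have ht0 : t = 0 := by push_cast at ht'; omega
          subst ht0
          simp only [add_zero, zero_mul]
          exact ⟨hiR, hj, hjC, hg⟩
        · intro hall
          by_cases hk1 : 1 ≤ k
          · exfalso
            have := hall 1 (by omega) (by push_cast; omega)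
            simp only [one_mul] at this
            exact hcond ⟨this.1, this.2.1, this.2.2.1⟩
          · have : k = 0 := by omega
            subst this; omega
    · rw [if_neg hg]
      constructor
      · intro hle; exfalso; push_cast at hle; omega
      · intro hall; exfalso
        have h0 := hall 0 (le_refl 0) (by push_cast; omega)
        simp only [add_zero, zero_mul] at h0
        exact hg h0.2.2.2

lemma upF_le_iff (R C : Int) (g : Int → Int → Bool) (dj : Int) (k : Nat) :
    ∀ i j : Int, 0 ≤ i → 0 ≤ j → j < C →
    (((k : Int) ≤ upF R C g dj i j) ↔
      ∀ t : Int, 0 ≤ t → t < (k : Int) →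
        (0 ≤ i - t ∧ 0 ≤ j + t*dj ∧ j + t*dj < C ∧ g (i-t) (j+t*dj) = true)) := by
  induction k with
  | zero =>
    intro i j _ _ _
    exact iff_of_true (by exact_mod_cast upF_nonneg R C g dj i j) (by intro t ht ht'; omega)
  | succ k ih =>
    intro i j hi hj hjC
    rw [upF]
    by_cases hg : g i j = true
    · rw [if_pos hg]
      by_cases hcond : 0 ≤ i - 1 ∧ 0 ≤ j + dj ∧ j + dj < C
      · rw [dif_pos hcond]
        have IH := ih (i-1) (j+dj) hcond.1 hcond.2.1 hcond.2.2
        constructor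
        · intro hle t ht ht'
          have hk : (k:ℤ) ≤ upF R C g dj (i-1) (j+dj) := by push_cast at hle; omega
          by_cases ht0 : t = 0
          · subst ht0
            simp only [sub_zero, zero_mul, add_zero]
            exact ⟨hi, hj, hjC, hg⟩
          · have := (IH.mp hk) (t-1) (by omega) (by push_cast at ht' ⊢; omega)
            have e1 : i - 1 - (t-1) = i - t := by ring
            have e2 : j + dj + (t-1)*dj = j + t*dj := by ring
            rw [e1, e2] at this
            exact this
        · intro hall
          have hk : (k:ℤ) ≤ upF R C g dj (i-1) (j+dj) := by
            refine IH.mpr (fun t ht ht' => ?_)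
            have := hall (t+1) (by omega) (by push_cast; omega)
            have e1 : i - (t+1) = i - 1 - t := by ring
            have e2 : j + (t+1)*dj = j + dj + t*dj := by ring
            rw [e1, e2] at this
            exact this
          push_cast
          omega
      · rw [dif_neg hcond]
        constructor
        · intro hle t ht ht'
          have hk0 : k = 0 := by push_cast at hle; omega
          have ht0 : t = 0 := by push_cast at ht'; omega
          subst ht0
          simp only [sub_zero, zero_mul, add_zero]
          exact ⟨hi, hj, hjC, hg⟩
        · intro hall
          by_cases hk1 : 1 ≤ k
          · exfalso
            have := hall 1 (by omega) (by push_cast; omega)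
            simp only [one_mul] at this
            exact hcond ⟨this.1, this.2.1, this.2.2.1⟩
          · have : k = 0 := by omega
            subst this; omega
    · rw [if_neg hg]
      constructor
      · intro hle; exfalso; push_cast at hle; omega
      · intro hall; exfalso
        have h0 := hall 0 (le_refl 0) (by push_cast; omega)
        simp only [sub_zero, zero_mul, add_zero] at h0
        exact hg h0.2.2.2

lemma downF_le_iff' (R C : Int) (g : Int → Int → Bool) (dj : Int) (k : Int) (hk : 0 ≤ k)
    (i j : Int) (hi : 0 ≤ i) (hiR : i < R) (hj : 0 ≤ j) (hjC : j < C) :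
    (k ≤ downF R C g dj i j ↔
      ∀ t : Int, 0 ≤ t → t < k →
        (i + t < R ∧ 0 ≤ j + t*dj ∧ j + t*dj < C ∧ g (i+t) (j+t*dj) = true)) := by
  have := downF_le_iff R C g dj k.toNat i j hi hiR hj hjC
  rwa [Int.toNat_of_nonneg hk] at this

lemma upF_le_iff' (R C : Int) (g : Int → Int → Bool) (dj : Int) (k : Int) (hk : 0 ≤ k)
    (i j : Int) (hi : 0 ≤ i) (hj : 0 ≤ j) (hjC : j < C) :
    (k ≤ upF R C g dj i j ↔
      ∀ t : Int, 0 ≤ t → t < k →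
        (0 ≤ i - t ∧ 0 ≤ j + t*dj ∧ j + t*dj < C ∧ g (i-t) (j+t*dj) = true)) := by
  have := upF_le_iff R C g dj k.toNat i j hi hj hjC
  rwa [Int.toNat_of_nonneg hk] at this

-- generic 'scan k downward, break at the first success' loop
def pvSeek (P : Int → Bool) : List Int → Int → Int
  | [], ms => ms
  | k :: rest, ms => if P k then max ms k else pvSeek P rest ms

lemma pvKloopA_eq_seek (R : Int) (lu ru : Int → Int → Int) (i j : Int) (l : List Int) (ms : Int) :
    pvKloopA R lu ru i j l ms =
      pvSeek (fun k => decide (i + 2*(k-1) < R) && decide ((k : Int) ≤ lu (i + 2*(k-1)) j)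
        && decide ((k : Int) ≤ ru (i + 2*(k-1)) j)) l ms := by
  induction l generalizing ms with
  | nil => rfl
  | cons k rest ih =>
    simp only [pvKloopA, pvSeek, Bool.and_eq_true, decide_eq_true_iff]
    split_ifs with h1 h2 h3 h3 <;> simp_all <;> omega

lemma pvKloopB_eq_seek (R C : Int) (mine : List String) (i j : Int) (l : List Int) (ms : Int) :
    pvKloopB R C mine i j l ms =
      pvSeek (fun k => pvDiamond R C mine i j (i + 2*(k-1)) k) l ms := by
  induction l generalizing ms with
  | nil => rfl
  | cons k rest ih => simp only [pvKloopB, pvSeek]; split_ifs <;> simp_all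

lemma pvSeek_congr (P Q : Int → Bool) (l : List Int) (h : ∀ k ∈ l, P k = Q k) (ms : Int) :
    pvSeek P l ms = pvSeek Q l ms := by
  induction l generalizing ms with
  | nil => rfl
  | cons k rest ih =>
    simp only [pvSeek, h k (by simp)]
    split_ifs
    · rfl
    · exact ih (fun a ha => h a (by simp [ha])) ms

lemma pvSeek_all_false (P : Int → Bool) (l : List Int) (h : ∀ k ∈ l, P k = false) (ms : Int) :
    pvSeek P l ms = ms := by
  induction l with
  | nil => rfl
  | cons k rest ih =>
    simp only [pvSeek, h k (by simp)]
    simpa using ih (fun a ha => h a (by simp [ha]))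

lemma pvSeek_extend (P : Int → Bool) : ∀ (n : Nat) (m m' : Int), m ≤ m' → (m' - m).toNat = n →
    (∀ k, m < k → k ≤ m' → P k = false) → ∀ ms : Int,
    pvSeek P (PySem.List.pyRange m' 0 (-1)) ms = pvSeek P (PySem.List.pyRange m 0 (-1)) ms := by
  intro n
  induction n with
  | zero =>
    intro m m' hmm hn _ ms
    have : m' = m := by omega
    rw [this]
  | succ n ih =>
    intro m m' hmm hn hfalse ms
    have hm' : m < m' := by omega
    by_cases h0 : 0 < m'
    · rw [PySem.List.pyRange_neg_one_cons h0]
      simp only [pvSeek, hfalse m' hm' (le_refl m'), Bool.false_eq_true, if_false]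
      exact ih m (m'-1) (by omega) (by omega) (fun k hk1 hk2 => hfalse k hk1 (by omega)) ms
    · rw [PySem.List.pyRange_neg_one_eq_nil (by omega : m' ≤ (0:Int)),
          PySem.List.pyRange_neg_one_eq_nil (by omega : m ≤ (0:Int))]

-- DP-table characterisations -------------------------------------------------

lemma pvRow1_inv (R C : Int) (mine : List String) (i : Int) (hi : 0 ≤ i) (hiR : i < R) :
    ∀ (n : Nat) (a : Int), 0 ≤ a → (C - a).toNat = n →
    ∀ st : (Int → Int → Int) × (Int → Int → Int),
    (∀ i' j', st.1 i' j' = if 0 ≤ i' ∧ i' < R ∧ 0 ≤ j' ∧ j' < C ∧ (i < i' ∨ (i' = i ∧ j' < a))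
        then downF R C (pvG mine) (-1) i' j' else 0) →
    (∀ i' j', st.2 i' j' = if 0 ≤ i' ∧ i' < R ∧ 0 ≤ j' ∧ j' < C ∧ (i < i' ∨ (i' = i ∧ j' < a))
        then downF R C (pvG mine) 1 i' j' else 0) →
    (∀ i' j',
      (((PySem.List.pyRange a C 1).foldl (pvStep1 R C mine i) st).1 i' j' =
        if 0 ≤ i' ∧ i' < R ∧ 0 ≤ j' ∧ j' < C ∧ (i < i' ∨ i' = i)
        then downF R C (pvG mine) (-1) i' j' else 0) ∧
      (((PySem.List.pyRange a C 1).foldl (pvStep1 R C mine i) st).2 i' j' =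
        if 0 ≤ i' ∧ i' < R ∧ 0 ≤ j' ∧ j' < C ∧ (i < i' ∨ i' = i)
        then downF R C (pvG mine) 1 i' j' else 0)) := by
  intro n
  induction n with
  | zero =>
    intro a ha hn st H1 H2 i' j'
    rw [show PySem.List.pyRange a C 1 = [] from PySem.List.pyRange_one_eq_nil (by omega)]
    simp only [List.foldl_nil]
    constructor
    · rw [H1 i' j']; split_ifs <;> first | rfl | (exfalso; omega)
    · rw [H2 i' j']; split_ifs <;> first | rfl | (exfalso; omega)
  | succ n ih =>
    intro a ha hn st H1 H2
    have haC : a < C := by omega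
    rw [show PySem.List.pyRange a C 1 = a :: PySem.List.pyRange (a+1) C 1 from
      PySem.List.pyRange_one_cons (by omega)]
    simp only [List.foldl_cons]
    refine ih (a+1) (by omega) (by omega) (pvStep1 R C mine i st a) ?_ ?_
    · -- first component after one step
      intro i' j'
      unfold pvStep1
      cases hgb : pvG mine i a with
      | false =>
        rw [if_neg (by simpa [pvG] using hgb)]
        rw [H1 i' j']
        by_cases hcell : i' = i ∧ j' = a
        · rw [hcell.1, hcell.2]
          rw [if_neg (show ¬(0 ≤ i ∧ i < R ∧ 0 ≤ a ∧ a < C ∧ (i < i ∨ i = i ∧ a < a)) by omega),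
              if_pos (show 0 ≤ i ∧ i < R ∧ 0 ≤ a ∧ a < C ∧ (i < i ∨ i = i ∧ a < a + 1) by omega),
              downF, if_neg (show ¬(pvG mine i a = true) by simp [hgb])]
        · split_ifs <;> first | rfl | (exfalso; omega)
      | true =>
        rw [if_pos (by simpa [pvG] using hgb)]
        show pvUpd st.1 i a (1 + (if i < R - 1 ∧ 0 < a then st.1 (i+1) (a-1) else 0)) i' j' = _
        unfold pvUpd
        by_cases hcell : i' = i ∧ j' = a
        · rw [hcell.1, hcell.2]
          rw [if_pos (⟨rfl, rfl⟩ : i = i ∧ a = a),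
              if_pos (show 0 ≤ i ∧ i < R ∧ 0 ≤ a ∧ a < C ∧ (i < i ∨ i = i ∧ a < a + 1) by omega),
              downF, if_pos hgb]
          by_cases hcnd : i < R - 1 ∧ 0 < a
          · rw [if_pos hcnd, dif_pos (show i + 1 < R ∧ 0 ≤ a + -1 ∧ a + -1 < C by omega),
                H1 (i+1) (a-1),
                if_pos (show 0 ≤ i+1 ∧ i+1 < R ∧ 0 ≤ a-1 ∧ a-1 < C ∧
                  (i < i+1 ∨ i+1 = i ∧ a-1 < a) by omega)]
            congr 1
          · rw [if_neg hcnd, dif_neg (show ¬(i + 1 < R ∧ 0 ≤ a + -1 ∧ a + -1 < C) by omega)]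
        · rw [if_neg hcell, H1 i' j']
          split_ifs <;> first | rfl | (exfalso; omega)
    · -- second component after one step
      intro i' j'
      unfold pvStep1
      cases hgb : pvG mine i a with
      | false =>
        rw [if_neg (by simpa [pvG] using hgb)]
        rw [H2 i' j']
        by_cases hcell : i' = i ∧ j' = a
        · rw [hcell.1, hcell.2]
          rw [if_neg (show ¬(0 ≤ i ∧ i < R ∧ 0 ≤ a ∧ a < C ∧ (i < i ∨ i = i ∧ a < a)) by omega),
              if_pos (show 0 ≤ i ∧ i < R ∧ 0 ≤ a ∧ a < C ∧ (i < i ∨ i = i ∧ a < a + 1) by omega),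
              downF, if_neg (show ¬(pvG mine i a = true) by simp [hgb])]
        · split_ifs <;> first | rfl | (exfalso; omega)
      | true =>
        rw [if_pos (by simpa [pvG] using hgb)]
        show pvUpd st.2 i a (1 + (if i < R - 1 ∧ a < C - 1 then st.2 (i+1) (a+1) else 0)) i' j' = _
        unfold pvUpd
        by_cases hcell : i' = i ∧ j' = a
        · rw [hcell.1, hcell.2]
          rw [if_pos (⟨rfl, rfl⟩ : i = i ∧ a = a),
              if_pos (show 0 ≤ i ∧ i < R ∧ 0 ≤ a ∧ a < C ∧ (i < i ∨ i = i ∧ a < a + 1) by omega),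
              downF, if_pos hgb]
          by_cases hcnd : i < R - 1 ∧ a < C - 1
          · rw [if_pos hcnd, dif_pos (show i + 1 < R ∧ 0 ≤ a + 1 ∧ a + 1 < C by omega),
                H2 (i+1) (a+1),
                if_pos (show 0 ≤ i+1 ∧ i+1 < R ∧ 0 ≤ a+1 ∧ a+1 < C ∧
                  (i < i+1 ∨ i+1 = i ∧ a+1 < a) by omega)]
          · rw [if_neg hcnd, dif_neg (show ¬(i + 1 < R ∧ 0 ≤ a + 1 ∧ a + 1 < C) by omega)]
        · rw [if_neg hcell, H2 i' j']
          split_ifs <;> first | rfl | (exfalso; omega)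

lemma pvLoop1_aux (R C : Int) (mine : List String) :
    ∀ (n : Nat) (b : Int), b < R → (b+1).toNat = n →
    ∀ st : (Int → Int → Int) × (Int → Int → Int),
    (∀ i' j', st.1 i' j' = if 0 ≤ i' ∧ i' < R ∧ 0 ≤ j' ∧ j' < C ∧ b < i'
        then downF R C (pvG mine) (-1) i' j' else 0) →
    (∀ i' j', st.2 i' j' = if 0 ≤ i' ∧ i' < R ∧ 0 ≤ j' ∧ j' < C ∧ b < i'
        then downF R C (pvG mine) 1 i' j' else 0) →
    (∀ i' j',
      (((PySem.List.pyRange b (-1) (-1)).foldl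
          (fun st i => (PySem.List.pyRange 0 C 1).foldl (pvStep1 R C mine i) st) st).1 i' j' =
        if 0 ≤ i' ∧ i' < R ∧ 0 ≤ j' ∧ j' < C then downF R C (pvG mine) (-1) i' j' else 0) ∧
      (((PySem.List.pyRange b (-1) (-1)).foldl
          (fun st i => (PySem.List.pyRange 0 C 1).foldl (pvStep1 R C mine i) st) st).2 i' j' =
        if 0 ≤ i' ∧ i' < R ∧ 0 ≤ j' ∧ j' < C then downF R C (pvG mine) 1 i' j' else 0)) := by
  intro n
  induction n with
  | zero =>
    intro b hbR hn st H1 H2 i' j'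
    rw [show PySem.List.pyRange b (-1) (-1) = [] from PySem.List.pyRange_neg_one_eq_nil (by omega)]
    simp only [List.foldl_nil]
    constructor
    · rw [H1 i' j']; split_ifs <;> first | rfl | (exfalso; omega)
    · rw [H2 i' j']; split_ifs <;> first | rfl | (exfalso; omega)
  | succ n ih =>
    intro b hbR hn st H1 H2
    have hb0 : 0 ≤ b := by omega
    rw [show PySem.List.pyRange b (-1) (-1) = b :: PySem.List.pyRange (b-1) (-1) (-1) from
      PySem.List.pyRange_neg_one_cons (by omega)]
    simp only [List.foldl_cons]
    have hrow := pvRow1_inv R C mine b hb0 hbR (C - 0).toNat 0 le_rfl rfl st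
      (fun i' j' => by rw [H1 i' j']; split_ifs <;> first | rfl | (exfalso; omega))
      (fun i' j' => by rw [H2 i' j']; split_ifs <;> first | rfl | (exfalso; omega))
    refine ih (b-1) (by omega) (by omega) _ ?_ ?_
    · intro i' j'
      rw [(hrow i' j').1]
      split_ifs <;> first | rfl | (exfalso; omega)
    · intro i' j'
      rw [(hrow i' j').2]
      split_ifs <;> first | rfl | (exfalso; omega)

lemma pvLoop1_spec (R C : Int) (mine : List String) (i j : Int)
    (hi : 0 ≤ i) (hiR : i < R) (hj : 0 ≤ j) (hjC : j < C) :
    (pvLoop1 R C mine).1 i j = downF R C (pvG mine) (-1) i j ∧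
    (pvLoop1 R C mine).2 i j = downF R C (pvG mine) 1 i j := by
  unfold pvLoop1
  have h := pvLoop1_aux R C mine ((R-1)+1).toNat (R-1) (by omega) rfl
    (fun _ _ => 0, fun _ _ => 0)
    (fun i' j' => by split_ifs <;> first | rfl | (exfalso; omega))
    (fun i' j' => by split_ifs <;> first | rfl | (exfalso; omega)) i j
  rw [h.1, h.2, if_pos (by omega), if_pos (by omega)]
  exact ⟨rfl, rfl⟩

lemma pvRow2_inv (R C : Int) (mine : List String) (i : Int) (hi : 0 ≤ i) (hiR : i < R) :
    ∀ (n : Nat) (a : Int), 0 ≤ a → (C - a).toNat = n →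
    ∀ st : (Int → Int → Int) × (Int → Int → Int),
    (∀ i' j', st.1 i' j' = if 0 ≤ i' ∧ i' < R ∧ 0 ≤ j' ∧ j' < C ∧ (i' < i ∨ (i' = i ∧ j' < a))
        then upF R C (pvG mine) (-1) i' j' else 0) →
    (∀ i' j', st.2 i' j' = if 0 ≤ i' ∧ i' < R ∧ 0 ≤ j' ∧ j' < C ∧ (i' < i ∨ (i' = i ∧ j' < a))
        then upF R C (pvG mine) 1 i' j' else 0) →
    (∀ i' j',
      (((PySem.List.pyRange a C 1).foldl (pvStep2 R C mine i) st).1 i' j' =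
        if 0 ≤ i' ∧ i' < R ∧ 0 ≤ j' ∧ j' < C ∧ (i' < i ∨ i' = i)
        then upF R C (pvG mine) (-1) i' j' else 0) ∧
      (((PySem.List.pyRange a C 1).foldl (pvStep2 R C mine i) st).2 i' j' =
        if 0 ≤ i' ∧ i' < R ∧ 0 ≤ j' ∧ j' < C ∧ (i' < i ∨ i' = i)
        then upF R C (pvG mine) 1 i' j' else 0)) := by
  intro n
  induction n with
  | zero =>
    intro a ha hn st H1 H2 i' j'
    rw [show PySem.List.pyRange a C 1 = [] from PySem.List.pyRange_one_eq_nil (by omega)]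
    simp only [List.foldl_nil]
    constructor
    · rw [H1 i' j']; split_ifs <;> first | rfl | (exfalso; omega)
    · rw [H2 i' j']; split_ifs <;> first | rfl | (exfalso; omega)
  | succ n ih =>
    intro a ha hn st H1 H2
    have haC : a < C := by omega
    rw [show PySem.List.pyRange a C 1 = a :: PySem.List.pyRange (a+1) C 1 from
      PySem.List.pyRange_one_cons (by omega)]
    simp only [List.foldl_cons]
    refine ih (a+1) (by omega) (by omega) (pvStep2 R C mine i st a) ?_ ?_
    · intro i' j'
      unfold pvStep2
      cases hgb : pvG mine i a with
      | false =>
        rw [if_neg (by simpa [pvG] using hgb)]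
        rw [H1 i' j']
        by_cases hcell : i' = i ∧ j' = a
        · rw [hcell.1, hcell.2]
          rw [if_neg (show ¬(0 ≤ i ∧ i < R ∧ 0 ≤ a ∧ a < C ∧ (i < i ∨ i = i ∧ a < a)) by omega),
              if_pos (show 0 ≤ i ∧ i < R ∧ 0 ≤ a ∧ a < C ∧ (i < i ∨ i = i ∧ a < a + 1) by omega),
              upF, if_neg (show ¬(pvG mine i a = true) by simp [hgb])]
        · split_ifs <;> first | rfl | (exfalso; omega)
      | true =>
        rw [if_pos (by simpa [pvG] using hgb)]
        show pvUpd st.1 i a (1 + (if 0 < i ∧ 0 < a then st.1 (i-1) (a-1) else 0)) i' j' = _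
        unfold pvUpd
        by_cases hcell : i' = i ∧ j' = a
        · rw [hcell.1, hcell.2]
          rw [if_pos (⟨rfl, rfl⟩ : i = i ∧ a = a),
              if_pos (show 0 ≤ i ∧ i < R ∧ 0 ≤ a ∧ a < C ∧ (i < i ∨ i = i ∧ a < a + 1) by omega),
              upF, if_pos hgb]
          by_cases hcnd : 0 < i ∧ 0 < a
          · rw [if_pos hcnd, dif_pos (show 0 ≤ i - 1 ∧ 0 ≤ a + -1 ∧ a + -1 < C by omega),
                H1 (i-1) (a-1),
                if_pos (show 0 ≤ i-1 ∧ i-1 < R ∧ 0 ≤ a-1 ∧ a-1 < C ∧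
                  (i-1 < i ∨ i-1 = i ∧ a-1 < a) by omega)]
            congr 1
          · rw [if_neg hcnd, dif_neg (show ¬(0 ≤ i - 1 ∧ 0 ≤ a + -1 ∧ a + -1 < C) by omega)]
        · rw [if_neg hcell, H1 i' j']
          split_ifs <;> first | rfl | (exfalso; omega)
    · intro i' j'
      unfold pvStep2
      cases hgb : pvG mine i a with
      | false =>
        rw [if_neg (by simpa [pvG] using hgb)]
        rw [H2 i' j']
        by_cases hcell : i' = i ∧ j' = a
        · rw [hcell.1, hcell.2]
          rw [if_neg (show ¬(0 ≤ i ∧ i < R ∧ 0 ≤ a ∧ a < C ∧ (i < i ∨ i = i ∧ a < a)) by omega),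
              if_pos (show 0 ≤ i ∧ i < R ∧ 0 ≤ a ∧ a < C ∧ (i < i ∨ i = i ∧ a < a + 1) by omega),
              upF, if_neg (show ¬(pvG mine i a = true) by simp [hgb])]
        · split_ifs <;> first | rfl | (exfalso; omega)
      | true =>
        rw [if_pos (by simpa [pvG] using hgb)]
        show pvUpd st.2 i a (1 + (if 0 < i ∧ a < C - 1 then st.2 (i-1) (a+1) else 0)) i' j' = _
        unfold pvUpd
        by_cases hcell : i' = i ∧ j' = a
        · rw [hcell.1, hcell.2]
          rw [if_pos (⟨rfl, rfl⟩ : i = i ∧ a = a),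
              if_pos (show 0 ≤ i ∧ i < R ∧ 0 ≤ a ∧ a < C ∧ (i < i ∨ i = i ∧ a < a + 1) by omega),
              upF, if_pos hgb]
          by_cases hcnd : 0 < i ∧ a < C - 1
          · rw [if_pos hcnd, dif_pos (show 0 ≤ i - 1 ∧ 0 ≤ a + 1 ∧ a + 1 < C by omega),
                H2 (i-1) (a+1),
                if_pos (show 0 ≤ i-1 ∧ i-1 < R ∧ 0 ≤ a+1 ∧ a+1 < C ∧
                  (i-1 < i ∨ i-1 = i ∧ a+1 < a) by omega)]
          · rw [if_neg hcnd, dif_neg (show ¬(0 ≤ i - 1 ∧ 0 ≤ a + 1 ∧ a + 1 < C) by omega)]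
        · rw [if_neg hcell, H2 i' j']
          split_ifs <;> first | rfl | (exfalso; omega)

lemma pvLoop2_aux (R C : Int) (mine : List String) :
    ∀ (n : Nat) (a : Int), 0 ≤ a → (R - a).toNat = n →
    ∀ st : (Int → Int → Int) × (Int → Int → Int),
    (∀ i' j', st.1 i' j' = if 0 ≤ i' ∧ i' < R ∧ 0 ≤ j' ∧ j' < C ∧ i' < a
        then upF R C (pvG mine) (-1) i' j' else 0) →
    (∀ i' j', st.2 i' j' = if 0 ≤ i' ∧ i' < R ∧ 0 ≤ j' ∧ j' < C ∧ i' < a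
        then upF R C (pvG mine) 1 i' j' else 0) →
    (∀ i' j',
      (((PySem.List.pyRange a R 1).foldl
          (fun st i => (PySem.List.pyRange 0 C 1).foldl (pvStep2 R C mine i) st) st).1 i' j' =
        if 0 ≤ i' ∧ i' < R ∧ 0 ≤ j' ∧ j' < C then upF R C (pvG mine) (-1) i' j' else 0) ∧
      (((PySem.List.pyRange a R 1).foldl
          (fun st i => (PySem.List.pyRange 0 C 1).foldl (pvStep2 R C mine i) st) st).2 i' j' =
        if 0 ≤ i' ∧ i' < R ∧ 0 ≤ j' ∧ j' < C then upF R C (pvG mine) 1 i' j' else 0)) := by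
  intro n
  induction n with
  | zero =>
    intro a ha hn st H1 H2 i' j'
    rw [show PySem.List.pyRange a R 1 = [] from PySem.List.pyRange_one_eq_nil (by omega)]
    simp only [List.foldl_nil]
    constructor
    · rw [H1 i' j']; split_ifs <;> first | rfl | (exfalso; omega)
    · rw [H2 i' j']; split_ifs <;> first | rfl | (exfalso; omega)
  | succ n ih =>
    intro a ha hn st H1 H2
    have haR : a < R := by omega
    rw [show PySem.List.pyRange a R 1 = a :: PySem.List.pyRange (a+1) R 1 from
      PySem.List.pyRange_one_cons (by omega)]
    simp only [List.foldl_cons]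
    have hrow := pvRow2_inv R C mine a ha haR (C - 0).toNat 0 le_rfl rfl st
      (fun i' j' => by rw [H1 i' j']; split_ifs <;> first | rfl | (exfalso; omega))
      (fun i' j' => by rw [H2 i' j']; split_ifs <;> first | rfl | (exfalso; omega))
    refine ih (a+1) (by omega) (by omega) _ ?_ ?_
    · intro i' j'
      rw [(hrow i' j').1]
      split_ifs <;> first | rfl | (exfalso; omega)
    · intro i' j'
      rw [(hrow i' j').2]
      split_ifs <;> first | rfl | (exfalso; omega)

lemma pvLoop2_spec (R C : Int) (mine : List String) (i j : Int)
    (hi : 0 ≤ i) (hiR : i < R) (hj : 0 ≤ j) (hjC : j < C) :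
    (pvLoop2 R C mine).1 i j = upF R C (pvG mine) (-1) i j ∧
    (pvLoop2 R C mine).2 i j = upF R C (pvG mine) 1 i j := by
  unfold pvLoop2
  have h := pvLoop2_aux R C mine (R - 0).toNat 0 le_rfl rfl
    (fun _ _ => 0, fun _ _ => 0)
    (fun i' j' => by split_ifs <;> first | rfl | (exfalso; omega))
    (fun i' j' => by split_ifs <;> first | rfl | (exfalso; omega)) i j
  rw [h.1, h.2, if_pos (by omega), if_pos (by omega)]
  exact ⟨rfl, rfl⟩

-- per-cell equivalence -------------------------------------------------------

lemma pvBoolExt {x y : Bool} (h : x = true ↔ y = true) : x = y := by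
  cases x <;> cases y <;> simp_all

lemma pvOk_iff (R C : Int) (mine : List String) (a b : Int) :
    pvOk R C mine a b = true ↔ (0 ≤ a ∧ a < R ∧ 0 ≤ b ∧ b < C ∧ pvG mine a b = true) := by
  simp [pvOk, pvG, Bool.and_eq_true, and_assoc]

lemma pvDiamond_iff (R C : Int) (mine : List String) (i j k : Int) :
    pvDiamond R C mine i j (i + 2*(k-1)) k = true ↔
      ∀ t : Int, 0 ≤ t → t < k →
        (pvOk R C mine (i+t) (j+t) = true ∧ pvOk R C mine (i+t) (j-t) = true ∧
         pvOk R C mine (i + 2*(k-1) - t) (j+t) = true ∧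
         pvOk R C mine (i + 2*(k-1) - t) (j-t) = true) := by
  unfold pvDiamond
  rw [List.all_eq_true]
  constructor
  · intro h t ht ht'
    have := h t (by rw [PySem.List.mem_pyRange_one]; exact ⟨ht, ht'⟩)
    simpa [Bool.and_eq_true, and_assoc] using this
  · intro h t htm
    rw [PySem.List.mem_pyRange_one] at htm
    have := h t htm.1 htm.2
    simp [Bool.and_eq_true, and_assoc, this.1, this.2.1, this.2.2.1, this.2.2.2]

-- the full characterisation of B's edge test in terms of A's four run lengths
lemma pvPB_iff (R C : Int) (mine : List String) (i j k : Int)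
    (hi : 0 ≤ i) (hiR : i < R) (hj : 0 ≤ j) (hjC : j < C) (hk : 1 ≤ k) :
    (pvDiamond R C mine i j (i + 2*(k-1)) k = true ↔
      (i + 2*(k-1) < R ∧
       k ≤ upF R C (pvG mine) (-1) (i + 2*(k-1)) j ∧
       k ≤ upF R C (pvG mine) 1 (i + 2*(k-1)) j ∧
       k ≤ downF R C (pvG mine) (-1) i j ∧
       k ≤ downF R C (pvG mine) 1 i j)) := by
  have hbi0 : 0 ≤ i + 2*(k-1) := by omega
  have hDp := downF_le_iff' R C (pvG mine) 1 k (by omega) i j hi hiR hj hjC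
  have hDm := downF_le_iff' R C (pvG mine) (-1) k (by omega) i j hi hiR hj hjC
  have hUp := upF_le_iff' R C (pvG mine) 1 k (by omega) (i + 2*(k-1)) j hbi0 hj hjC
  have hUm := upF_le_iff' R C (pvG mine) (-1) k (by omega) (i + 2*(k-1)) j hbi0 hj hjC
  rw [pvDiamond_iff]
  constructor
  · intro h
    have hbiR : i + 2*(k-1) < R := by
      have := (h 0 (le_refl 0) (by omega)).2.2.1
      rw [pvOk_iff] at this
      have h2 := this.2.1
      omega
    refine ⟨hbiR, ?_, ?_, ?_, ?_⟩
    · refine hUm.mpr (fun t ht ht' => ?_)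
      have := (h t ht ht').2.2.2
      rw [pvOk_iff] at this
      have e : j + t * (-1) = j - t := by ring
      rw [e]
      exact ⟨this.1, this.2.2.1, this.2.2.2.1, this.2.2.2.2⟩
    · refine hUp.mpr (fun t ht ht' => ?_)
      have := (h t ht ht').2.2.1
      rw [pvOk_iff] at this
      have e : j + t * 1 = j + t := by ring
      rw [e]
      exact ⟨this.1, this.2.2.1, this.2.2.2.1, this.2.2.2.2⟩
    · refine hDm.mpr (fun t ht ht' => ?_)
      have := (h t ht ht').2.1
      rw [pvOk_iff] at this
      have e : j + t * (-1) = j - t := by ring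
      rw [e]
      exact ⟨this.2.1, this.2.2.1, this.2.2.2.1, this.2.2.2.2⟩
    · refine hDp.mpr (fun t ht ht' => ?_)
      have := (h t ht ht').1
      rw [pvOk_iff] at this
      have e : j + t * 1 = j + t := by ring
      rw [e]
      exact ⟨this.2.1, this.2.2.1, this.2.2.2.1, this.2.2.2.2⟩
  · rintro ⟨hbiR, hum, hup, hdm, hdp⟩ t ht ht'
    have h1 := hDp.mp hdp t ht ht'
    have h2 := hDm.mp hdm t ht ht'
    have h3 := hUp.mp hup t ht ht'
    have h4 := hUm.mp hum t ht ht'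
    have ep : j + t * 1 = j + t := by ring
    have em : j + t * (-1) = j - t := by ring
    rw [ep] at h1 h3
    rw [em] at h2 h4
    refine ⟨?_, ?_, ?_, ?_⟩ <;> rw [pvOk_iff]
    · exact ⟨by omega, h1.1, h1.2.1, h1.2.2.1, h1.2.2.2⟩
    · exact ⟨by omega, h2.1, h2.2.1, h2.2.2.1, h2.2.2.2⟩
    · exact ⟨by omega, by omega, h3.2.1, h3.2.2.1, h3.2.2.2⟩
    · exact ⟨by omega, by omega, h4.2.1, h4.2.2.1, h4.2.2.2⟩

-- B's test at size k forces k within B's scan bound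
lemma pvPB_le_kmax (R C : Int) (mine : List String) (i j k : Int) (hk : 1 ≤ k)
    (h : pvDiamond R C mine i j (i + 2*(k-1)) k = true) :
    k ≤ min (min (PySem.Int.floordiv (R - i + 1) 2) (j+1)) (C - j) := by
  rw [pvDiamond_iff] at h
  have h0 := h 0 (le_refl 0) (by omega)
  have hk1 := h (k-1) (by omega) (by omega)
  simp only [pvOk_iff] at h0 hk1
  have hbiR : i + 2*(k-1) - 0 < R := h0.2.2.1.2.1
  have hA : j + (k-1) < C := hk1.1.2.2.2.1
  have hB : 0 ≤ j - (k-1) := hk1.2.1.2.2.1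
  have h2 : k ≤ PySem.Int.floordiv (R - i + 1) 2 := by
    rw [PySem.Int.le_floordiv_iff_mul_le (by norm_num)]
    omega
  omega

lemma pvCell_eq (R C : Int) (mine : List String) (i j ms : Int)
    (hi : 0 ≤ i) (hiR : i < R) (hj : 0 ≤ j) (hjC : j < C) :
    pvCellA R C mine (pvLoop1 R C mine) (pvLoop2 R C mine) i ms j =
    pvCellB R C mine i ms j := by
  obtain ⟨hld, hrd⟩ := pvLoop1_spec R C mine i j hi hiR hj hjC
  simp only [pvCellA, pvCellB, pvKloopA_eq_seek, pvKloopB_eq_seek]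
  rw [hld, hrd]
  have hdfm0 : 0 ≤ downF R C (pvG mine) (-1) i j := downF_nonneg R C (pvG mine) (-1) i j
  have hdfp0 : 0 ≤ downF R C (pvG mine) 1 i j := downF_nonneg R C (pvG mine) 1 i j
  have hfd1 : 1 ≤ PySem.Int.floordiv (R - i + 1) 2 := by
    rw [PySem.Int.le_floordiv_iff_mul_le (by norm_num)]
    omega
  set mp := min (downF R C (pvG mine) (-1) i j) (downF R C (pvG mine) 1 i j) with hmp
  set kmax := min (min (PySem.Int.floordiv (R - i + 1) 2) (j+1)) (C - j) with hkmaxdef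
  have hPBmp : ∀ k : Int, mp < k → pvDiamond R C mine i j (i + 2*(k-1)) k = false := by
    intro k hk
    cases hq : pvDiamond R C mine i j (i + 2*(k-1)) k with
    | false => rfl
    | true =>
      exfalso
      have hk1 : (1:Int) ≤ k := by omega
      have := (pvPB_iff R C mine i j k hi hiR hj hjC hk1).mp hq
      omega
  have hPBkmax : ∀ k : Int, kmax < k → pvDiamond R C mine i j (i + 2*(k-1)) k = false := by
    intro k hk
    cases hq : pvDiamond R C mine i j (i + 2*(k-1)) k with
    | false => rfl
    | true =>
      exfalso
      have hk1 : (1:Int) ≤ k := by omega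
      have := pvPB_le_kmax R C mine i j k hk1 hq
      omega
  by_cases h0 : (pvAt mine i j == some '0') = true
  · rw [if_pos h0]
    have hA0 : pvAt mine i j = some '0' := by simpa using h0
    have hgf : pvG mine i j = false := by unfold pvG; rw [hA0]; decide
    symm
    refine pvSeek_all_false _ _ (fun k hk => ?_) ms
    rw [PySem.List.mem_pyRange_neg_one] at hk
    cases hq : pvDiamond R C mine i j (i + 2*(k-1)) k with
    | false => rfl
    | true =>
      exfalso
      have := (pvPB_iff R C mine i j k hi hiR hj hjC (by omega)).mp hq
      have hz : downF R C (pvG mine) 1 i j = 0 := by rw [downF]; simp [hgf]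
      omega
  · rw [if_neg h0]
    refine Eq.trans (pvSeek_congr _ (fun k => pvDiamond R C mine i j (i + 2*(k-1)) k) _
      (fun k hk => ?_) ms) ?_
    · rw [PySem.List.mem_pyRange_neg_one] at hk
      have hk1 : (1:Int) ≤ k := by omega
      have hbi0 : 0 ≤ i + 2*(k-1) := by omega
      refine pvBoolExt ?_
      simp only [Bool.and_eq_true, decide_eq_true_iff]
      constructor
      · rintro ⟨⟨hbiR, hlu⟩, hru⟩
        have hsp := pvLoop2_spec R C mine (i + 2*(k-1)) j hbi0 hbiR hj hjC
        rw [hsp.1] at hlu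
        rw [hsp.2] at hru
        exact (pvPB_iff R C mine i j k hi hiR hj hjC hk1).mpr
          ⟨hbiR, hlu, hru, by omega, by omega⟩
      · intro hq
        have hh := (pvPB_iff R C mine i j k hi hiR hj hjC hk1).mp hq
        have hsp := pvLoop2_spec R C mine (i + 2*(k-1)) j hbi0 hh.1 hj hjC
        exact ⟨⟨hh.1, by rw [hsp.1]; exact hh.2.1⟩, by rw [hsp.2]; exact hh.2.2.1⟩
    · have e1 := pvSeek_extend (fun k => pvDiamond R C mine i j (i + 2*(k-1)) k)
        (max mp kmax - mp).toNat mp (max mp kmax) (le_max_left _ _) rfl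
        (fun k hka _ => hPBmp k hka) ms
      have e2 := pvSeek_extend (fun k => pvDiamond R C mine i j (i + 2*(k-1)) k)
        (max mp kmax - kmax).toNat kmax (max mp kmax) (le_max_right _ _) rfl
        (fun k hka _ => hPBkmax k hka) ms
      rw [← e1, e2]

-- ===== VERDICT (by name: the statement is the Claim_ definition above) =====
theorem largest_diamond_spec : Claim_equal_largest_diamond := by
  intro R C mine _ _
  unfold Spec_largest_diamond
  simp only [largest_diamond, largest_diamond_alt]
  refine PySem.List.foldl_congr_mem _ _ _ _ ?_
  intro ms i hi
  refine PySem.List.foldl_congr_mem _ _ _ _ ?_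
  intro ms' j hj
  rw [PySem.List.mem_pyRange_one] at hi hj
  exact pvCell_eq R C mine i j ms' hi.1 hi.2 hj.1 hj.2
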